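-- pv_equiv track=rewrite | github.com/ss433s/coding_test | lc159 最多2字符的最长子串.py | solve
-- ===== SOURCE A (Python) =====
-- def solve(chars):
--     max_length = 0
--     for i in range(len(chars)-1):
--         char_list = [chars[i], chars[i+1]]
--         this_max_length = 1
--         for j in range(i+1, len(chars)):
--             if chars[j] in char_list:
--                 this_max_length += 1
--             else:
--                 break
--         max_length = max(max_length, this_max_length)
--     return max_length
-- ===== SOURCE B (Python) =====
-- def solve(chars):
--     best = 0
--     prev = None   # character at the next position to the right
--     r = 1         # length of the run of equal chars starting at the next position
--     e = 1         # longest prefix from the next position over {its char, first differing char}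
--     d = None      # first char to the right of the next position differing from its char
--     for c in reversed(chars):
--         if prev is None:
--             prev = c
--         elif c == prev:
--             r, e = r + 1, e + 1
--             best = max(best, r)
--             prev = c
--         else:
--             e = 1 + (e if d == c else r)
--             d, r = prev, 1
--             best = max(best, e)
--             prev = c
--     return best
-- ===== Notes on version B (the rewrite author's own statement) =====
-- stated objective: faster
-- what changed: A rescans the string from every start index (quadratic); B makes a single right-to-left pass maintaining the current run length, the two-character extent and the first differing character, taking the running maximum.
import Mathlib
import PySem

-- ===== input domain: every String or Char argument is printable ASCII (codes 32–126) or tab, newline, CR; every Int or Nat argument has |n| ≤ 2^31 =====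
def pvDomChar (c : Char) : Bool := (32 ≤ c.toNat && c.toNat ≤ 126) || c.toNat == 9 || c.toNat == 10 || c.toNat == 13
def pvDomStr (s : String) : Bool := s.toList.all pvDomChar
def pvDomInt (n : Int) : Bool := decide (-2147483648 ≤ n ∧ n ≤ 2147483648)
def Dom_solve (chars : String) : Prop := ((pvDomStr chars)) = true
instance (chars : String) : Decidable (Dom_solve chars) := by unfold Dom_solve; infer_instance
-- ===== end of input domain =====

-- B replaces A's quadratic scan-from-every-start with a single right-to-left pass
-- maintaining run/extent state (objective: faster, asymptotic).

-- ===== PORT A =====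
-- inner loop 'for j in range(i+1, len(chars)): if chars[j] in char_list: … else: break'
def solveInner (cs : List Char) (clist : List Char) (j : Nat) (acc : Int) : Int :=
  if h : j < cs.length then
    if cs[j] ∈ clist then solveInner cs clist (j + 1) (acc + 1) else acc
  else acc
termination_by cs.length - j

def solveL (cs : List Char) : Int :=
  (PySem.List.pyRange 0 ((cs.length : Int) - 1) 1).foldl
    (fun maxl i =>
      max maxl
        (solveInner cs [PySem.List.pyGetD cs i ' ', PySem.List.pyGetD cs (i + 1) ' ']
          (i.toNat + 1) 1)) 0

def solve (chars : String) : Int := solveL chars.toList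

-- ===== PORT B =====
-- state = (best, prev, r, e, d) exactly as in Source B
def stepB (s : Int × Option Char × Int × Int × Option Char) (c : Char) :
    Int × Option Char × Int × Int × Option Char :=
  match s with
  | (best, none, r, e, d) => (best, some c, r, e, d)
  | (best, some p, r, e, d) =>
    if c = p then (max best (r + 1), some c, r + 1, e + 1, d)
    else
      (max best (1 + (if d = some c then e else r)), some c, 1,
        1 + (if d = some c then e else r), some p)

def solve_alt (chars : String) : Int :=
  (chars.toList.reverse.foldl stepB (0, none, 1, 1, none)).1

-- ===== PRECONDITION & SPEC =====
def Spec_solve (chars : String) (out : Int) : Prop := out = solve_alt chars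
instance (chars : String) (out : Int) : Decidable (Spec_solve chars out) := by unfold Spec_solve; infer_instance

-- ===== CLAIM (what is proved, stated in full; the proofs are below) =====
def Claim_equal_solve : Prop := ∀ (chars : String), Dom_solve chars → Spec_solve chars (solve chars)

-- ===== LEMMAS AND PROOFS =====

-- length of the run of `c`s at the head of the list
def runLen (c : Char) : List Char → Int
  | [] => 0
  | x :: t => if x = c then 1 + runLen c t else 0

-- length of the longest prefix whose members all lie in S
def prefLen (S : List Char) : List Char → Int
  | [] => 0
  | x :: t => if x ∈ S then 1 + prefLen S t else 0

-- first element differing from c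
def firstDiff (c : Char) : List Char → Option Char
  | [] => none
  | x :: t => if x = c then firstDiff c t else some x

def eVal (c : Char) (t : List Char) : Int :=
  match firstDiff c t with
  | none => 1 + runLen c t
  | some d => 1 + prefLen [c, d] t

def bestA : List Char → Int
  | c :: x :: t => max (1 + prefLen [c, x] (x :: t)) (bestA (x :: t))
  | _ => 0

def bestB : List Char → Int
  | c :: x :: t => max (bestB (x :: t)) (1 + prefLen [c, x] (x :: t))
  | _ => 0

theorem prefLen_pair_same (c : Char) (t : List Char) : prefLen [c, c] t = runLen c t := by
  induction t with
  | nil => rfl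
  | cons x t ih =>
    simp only [prefLen, runLen, List.mem_cons, List.not_mem_nil, or_false, or_self, ih]

theorem prefLen_pair_comm (a b : Char) (t : List Char) : prefLen [a, b] t = prefLen [b, a] t := by
  induction t with
  | nil => rfl
  | cons x t ih =>
    simp only [prefLen, ih, List.mem_cons, List.not_mem_nil, or_false]
    by_cases h1 : x = a <;> by_cases h2 : x = b <;> simp [h1, h2]

theorem prefLen_eq_runLen_of_firstDiff_none (c x : Char) (t : List Char)
    (h : firstDiff x t = none) (hx : x ∈ [c, x]) : prefLen [c, x] t = runLen x t := by
  induction t with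
  | nil => rfl
  | cons y t ih =>
    by_cases hy : y = x
    · subst hy
      simp only [firstDiff] at h
      simp [prefLen, runLen, hx, ih h]
    · simp [firstDiff, hy] at h

theorem prefLen_eq_runLen_of_firstDiff_ne (c x d : Char) (t : List Char)
    (h : firstDiff x t = some d) (hdc : d ≠ c) : prefLen [c, x] t = runLen x t := by
  induction t with
  | nil => simp [firstDiff] at h
  | cons y t ih =>
    by_cases hy : y = x
    · subst hy
      simp only [firstDiff] at h
      simp [prefLen, runLen, ih h]
    · simp only [firstDiff, if_neg hy] at h
      have hd : y = d := by injection h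
      have hyc : y ≠ c := by rw [hd]; exact hdc
      simp [prefLen, runLen, hy, hyc]

theorem eVal_cons_same (x : Char) (t : List Char) : eVal x (x :: t) = eVal x t + 1 := by
  unfold eVal
  have hfd : firstDiff x (x :: t) = firstDiff x t := by simp [firstDiff]
  rw [hfd]
  cases h : firstDiff x t with
  | none => simp [runLen]; ring
  | some d => simp [prefLen]; ring

theorem eVal_cons_diff (c x : Char) (t : List Char) (hne : c ≠ x) :
    eVal c (x :: t) =
      1 + (if firstDiff x t = some c then eVal x t else 1 + runLen x t) := by
  have hfd : firstDiff c (x :: t) = some x := by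
    unfold firstDiff; rw [if_neg (fun h : x = c => hne h.symm)]
  have hx : x ∈ [c, x] := by simp
  have hL : eVal c (x :: t) = 1 + prefLen [c, x] (x :: t) := by
    unfold eVal; rw [hfd]
  rw [hL]
  have hpre : prefLen [c, x] (x :: t) = 1 + prefLen [c, x] t := by simp [prefLen, hx]
  rw [hpre]
  cases h : firstDiff x t with
  | none =>
    simp only [reduceCtorEq, if_false]
    rw [prefLen_eq_runLen_of_firstDiff_none c x t h hx]
  | some d =>
    by_cases hdc : d = c
    · rw [hdc] at h
      rw [hdc, if_pos rfl]
      have hE : eVal x t = 1 + prefLen [x, c] t := by unfold eVal; rw [h]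
      rw [hE, prefLen_pair_comm c x t]
    · have hne2 : ¬ (some d = some c) := by simp [hdc]
      rw [if_neg hne2, prefLen_eq_runLen_of_firstDiff_ne c x d t h hdc]

-- the state invariant of B's loop
theorem stateB_spec : ∀ (t : List Char) (c : Char),
    (c :: t).foldr (fun a s => stepB s a) (0, none, 1, 1, none) =
      (bestB (c :: t), some c, 1 + runLen c t, eVal c t, firstDiff c t) := by
  intro t
  induction t with
  | nil =>
    intro c
    simp [stepB, bestB, runLen, eVal, firstDiff]
  | cons x t ih =>
    intro c
    have hfold : (c :: x :: t).foldr (fun a s => stepB s a) (0, none, 1, 1, none) =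
        stepB ((x :: t).foldr (fun a s => stepB s a) (0, none, 1, 1, none)) c := rfl
    rw [hfold, ih x]
    by_cases hcx : c = x
    · subst hcx
      simp only [stepB]
      have hb : bestB (c :: c :: t) = max (bestB (c :: t)) (1 + runLen c t + 1) := by
        simp only [bestB]
        have h3 : prefLen [c, c] (c :: t) = 1 + prefLen [c, c] t := by simp [prefLen]
        rw [h3, prefLen_pair_same]
        congr 1; ring
      have hr : (1 : Int) + runLen c (c :: t) = 1 + runLen c t + 1 := by
        rw [show runLen c (c :: t) = 1 + runLen c t from by simp [runLen]]; ring
      have hf : firstDiff c (c :: t) = firstDiff c t := by simp [firstDiff]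
      rw [hb, hr, eVal_cons_same, hf, if_pos trivial]
    · have hxc : ¬ (x = c) := fun h => hcx h.symm
      have hfd : firstDiff c (x :: t) = some x := by simp [firstDiff, hxc]
      have he : eVal c (x :: t) =
          1 + (if firstDiff x t = some c then eVal x t else 1 + runLen x t) :=
        eVal_cons_diff c x t hcx
      have hpre : eVal c (x :: t) = 1 + prefLen [c, x] (x :: t) := by
        unfold eVal; rw [hfd]
      simp only [stepB, if_neg hcx]
      have hb : bestB (c :: x :: t) =
          max (bestB (x :: t))
            (1 + (if firstDiff x t = some c then eVal x t else 1 + runLen x t)) := by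
        simp only [bestB]
        rw [← hpre, he]
      have hr : (1 : Int) + runLen c (x :: t) = 1 := by simp [runLen, hxc]
      rw [hb, hr, he, hfd]

theorem bestB_eq_bestA : ∀ l : List Char, bestB l = bestA l := by
  intro l
  induction l with
  | nil => rfl
  | cons c t ih =>
    cases t with
    | nil => rfl
    | cons x t' =>
      simp only [bestB, bestA] at *
      rw [ih, max_comm]

theorem solve_alt_eq_bestA (chars : String) : solve_alt chars = bestA chars.toList := by
  unfold solve_alt
  rw [List.foldl_reverse]
  cases h : chars.toList with
  | nil => simp [bestA]
  | cons c t =>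
    rw [stateB_spec t c, ← bestB_eq_bestA]

-- A-side: the inner loop counts the prefix lying in clist
theorem solveInner_eq (cs clist : List Char) : ∀ j acc,
    solveInner cs clist j acc = acc + prefLen clist (cs.drop j) := by
  intro j
  induction hj : cs.length - j using Nat.strong_induction_on generalizing j with
  | _ n ih =>
    intro acc
    rw [solveInner]
    by_cases h : j < cs.length
    · have hdrop : cs.drop j = cs[j] :: cs.drop (j + 1) := List.drop_eq_getElem_cons h
      rw [hdrop]
      by_cases hm : cs[j] ∈ clist
      · simp only [h, dif_pos, hm, if_pos, prefLen]
        rw [ih (cs.length - (j + 1)) (by omega) (j + 1) rfl]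
        ring
      · simp [h, hm, prefLen]
    · have : cs.drop j = [] := List.drop_eq_nil_of_le (by omega)
      simp [h, this, prefLen]

-- A's port, re-expressed as a fold over List.range with the inner loop summarised by prefLen
theorem solveL_eq_range (cs : List Char) :
    solveL cs = List.foldl
      (fun m k => max m (1 + prefLen [cs.getD k ' ', cs.getD (k + 1) ' '] (cs.drop (k + 1))))
      0 (List.range (cs.length - 1)) := by
  unfold solveL
  rw [PySem.List.pyRange_one, List.foldl_map]
  have hl : (((cs.length : Int)) - 1 - 0).toNat = cs.length - 1 := by omega
  rw [hl]
  apply List.foldl_ext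
  intro m k _
  have e1 : (0 : Int) + (k : Int) = ((k : Nat) : Int) := by ring
  rw [e1]
  have e2 : ((k : Nat) : Int) + 1 = ((k + 1 : Nat) : Int) := by push_cast; ring
  rw [e2]
  simp only [PySem.List.pyGetD_natCast, Int.toNat_natCast]
  rw [solveInner_eq]

theorem maxfold_ext (F G : Nat → Int) : ∀ (l : List Nat), (∀ k ∈ l, F k = G k) → ∀ (a : Int),
    List.foldl (fun m k => max m (F k)) a l = List.foldl (fun m k => max m (G k)) a l := by
  intro l
  induction l with
  | nil => intro _ a; rfl
  | cons x l ih =>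
    intro h a
    simp only [List.foldl_cons]
    rw [h x (by simp)]
    exact ih (fun k hk => h k (by simp [hk])) _

theorem bestA_nonneg : ∀ l : List Char, 0 ≤ bestA l := by
  intro l
  induction l with
  | nil => exact le_refl 0
  | cons c t ih =>
    cases t with
    | nil => exact le_refl 0
    | cons x t' =>
      simp only [bestA]
      exact le_trans ih (le_max_right _ _)

theorem rangefold_eq_bestA : ∀ (cs : List Char) (a : Int), 0 ≤ a →
    List.foldl
      (fun m k => max m (1 + prefLen [cs.getD k ' ', cs.getD (k + 1) ' '] (cs.drop (k + 1))))
      a (List.range (cs.length - 1)) = max a (bestA cs) := by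
  intro cs
  induction cs with
  | nil => intro a ha; simpa [bestA] using (max_eq_left ha).symm
  | cons c t ih =>
    cases t with
    | nil => intro a ha; simpa [bestA] using (max_eq_left ha).symm
    | cons x t' =>
      intro a ha
      have hlen : (c :: x :: t').length - 1 = t'.length + 1 := by simp
      rw [hlen, List.range_succ_eq_map, List.foldl_cons, List.foldl_map]
      refine Eq.trans (maxfold_ext
          (fun k => 1 + prefLen
            [(c :: x :: t').getD (k + 1) ' ', (c :: x :: t').getD (k + 1 + 1) ' ']
            ((c :: x :: t').drop (k + 1 + 1)))
          (fun k => 1 + prefLen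
            [(x :: t').getD k ' ', (x :: t').getD (k + 1) ' ']
            ((x :: t').drop (k + 1)))
          (List.range t'.length) (fun k _ => by simp [List.getD])
          (max a (1 + prefLen [c, x] (x :: t')))) ?_
      refine Eq.trans (ih (max a (1 + prefLen [c, x] (x :: t')))
          (le_trans ha (le_max_left _ _))) ?_
      rw [max_assoc]
      rfl

-- ===== VERDICT (by name: the statement is the Claim_ definition above) =====
theorem solve_spec : Claim_equal_solve := by
  intro chars _
  unfold Spec_solve solve
  rw [solve_alt_eq_bestA, solveL_eq_range, rangefold_eq_bestA chars.toList 0 le_rfl]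
  exact max_eq_right (bestA_nonneg _)
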